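-- pv_equiv track=rewrite | github.com/hacetheworld/competitive-programming-practices | problems/Summary_Power.py | Solution
-- ===== SOURCE A (Python) =====
-- def Solution(S, N, K):
--     # Solution
--     frm_I = 0
--     frm_J = K-1
--     count = 0
--     for i in range(1, len(S)-K+1):
--         temp = countPower(S, frm_I, frm_J, i, i+K-1)
--         count += temp
--         frm_I = i
--         frm_J = i+K-1
--     return count
--
-- def countPower(S, frm_I, frm_J, to_I, to_J):
--     counter = 0
--     while frm_I <= frm_J and to_I <= to_J:
--         if S[frm_I] != S[to_I]:
--             counter += 1
--         frm_I += 1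
--         to_I += 1
--     return counter
-- ===== SOURCE B (Python) =====
-- def Solution(S, N, K):
--     n = len(S)
--     if K <= 0 or n - K < 1:
--         return 0
--     # prefix sums of adjacent-mismatch indicators
--     P = [0]
--     t = 0
--     for j in range(n - 1):
--         if S[j] != S[j + 1]:
--             t += 1
--         P.append(t)
--     total = 0
--     for i in range(1, n - K + 1):
--         total += P[i + K - 1] - P[i - 1]
--     return total
-- ===== Notes on version B (the rewrite author's own statement) =====
-- stated objective: faster
-- what changed: Replaces A's per-window character-by-character rescan (countPower over each K-length window pair) with one pass building prefix sums of the adjacent-mismatch indicator array, answering each window in O(1) as a prefix-sum difference.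
import Mathlib
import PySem

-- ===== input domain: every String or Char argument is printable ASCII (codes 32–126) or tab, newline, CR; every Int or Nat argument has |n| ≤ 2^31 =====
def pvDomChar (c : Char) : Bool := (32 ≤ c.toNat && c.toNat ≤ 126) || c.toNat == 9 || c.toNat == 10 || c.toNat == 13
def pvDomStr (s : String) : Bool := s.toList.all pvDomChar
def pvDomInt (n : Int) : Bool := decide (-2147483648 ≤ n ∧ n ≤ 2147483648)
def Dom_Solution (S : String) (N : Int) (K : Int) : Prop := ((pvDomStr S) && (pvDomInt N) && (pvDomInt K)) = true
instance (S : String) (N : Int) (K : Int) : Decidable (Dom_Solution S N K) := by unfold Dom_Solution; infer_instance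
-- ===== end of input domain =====

-- B replaces A's per-window rescan by one prefix-sum pass over the adjacent-mismatch
-- indicators; return values proved equal on all inputs.

-- ===== PORT A =====
-- while loop of countPower; the fuel is exactly the loop's iteration bound (frmJ+1-frmI),
-- a totality device only. On every call A makes the indices are in range, so comparing
-- the two Options returned by pyGet? is exact (none never occurs on reached indices).
def countPowerAux (chars : List Char) : Nat → Int → Int → Int → Int → Int
  | 0, _, _, _, _ => 0
  | fuel + 1, frmI, frmJ, toI, toJ =>
    if frmI ≤ frmJ ∧ toI ≤ toJ then
      (if PySem.List.pyGet? chars frmI ≠ PySem.List.pyGet? chars toI then 1 else 0)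
        + countPowerAux chars fuel (frmI + 1) frmJ (toI + 1) toJ
    else 0

def countPowerA (chars : List Char) (frmI frmJ toI toJ : Int) : Int :=
  countPowerAux chars (frmJ + 1 - frmI).toNat frmI frmJ toI toJ

def Solution (S : String) (N : Int) (K : Int) : Int :=
  let chars := S.toList
  let res := (PySem.List.pyRange 1 ((chars.length : Int) - K + 1) 1).foldl
    (fun (s : Int × Int × Int) i =>
      let temp := countPowerA chars s.1 s.2.1 i (i + K - 1)
      (i, i + K - 1, s.2.2 + temp)) (0, K - 1, 0)
  res.2.2

-- ===== PORT B =====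
-- P[j] accesses are always in range in Source B, so '(pyGet? …).getD 0' is exact there.
def Solution_alt (S : String) (N : Int) (K : Int) : Int :=
  let chars := S.toList
  let n : Int := chars.length
  if K ≤ 0 ∨ n - K < 1 then 0
  else
    let tp := (PySem.List.pyRange 0 (n - 1) 1).foldl
      (fun (s : Int × List Int) j =>
        let t := if PySem.List.pyGet? chars j ≠ PySem.List.pyGet? chars (j + 1) then s.1 + 1 else s.1
        (t, s.2 ++ [t])) (0, ([0] : List Int))
    let P := tp.2
    (PySem.List.pyRange 1 (n - K + 1) 1).foldl
      (fun total i =>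
        total + ((PySem.List.pyGet? P (i + K - 1)).getD 0 - (PySem.List.pyGet? P (i - 1)).getD 0)) 0

-- ===== PRECONDITION & SPEC =====
def Spec_Solution (S : String) (N : Int) (K : Int) (out : Int) : Prop := out = Solution_alt S N K
instance (S : String) (N : Int) (K : Int) (out : Int) : Decidable (Spec_Solution S N K out) := by unfold Spec_Solution; infer_instance

-- ===== CLAIM (what is proved, stated in full; the proofs are below) =====
def Claim_equal_Solution : Prop := ∀ (S : String) (N : Int) (K : Int), Dom_Solution S N K → Spec_Solution S N K (Solution S N K)

-- ===== LEMMAS AND PROOFS =====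

-- adjacent-mismatch indicator at position j
def mis (chars : List Char) (j : Int) : Int :=
  if PySem.List.pyGet? chars j ≠ PySem.List.pyGet? chars (j + 1) then 1 else 0

-- sum of m consecutive mismatch indicators starting at a
def refSum (chars : List Char) (a : Int) : Nat → Int
  | 0 => 0
  | m + 1 => mis chars a + refSum chars (a + 1) m

-- the tail of B's prefix list, built from position a with running total t0
def prefList (chars : List Char) (a t0 : Int) : Nat → List Int
  | 0 => []
  | m + 1 => (t0 + mis chars a) :: prefList chars (a + 1) (t0 + mis chars a) m

-- sum of m consecutive window counts starting at window i
def wsum (chars : List Char) (K i : Int) : Nat → Int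
  | 0 => 0
  | m + 1 => refSum chars (i - 1) K.toNat + wsum chars K (i + 1) m

lemma cp_eq (chars : List Char) :
    ∀ (m : Nat) (a b : Int), (b + 1 - a).toNat = m →
      countPowerA chars a b (a + 1) (b + 1) = refSum chars a m := by
  intro m
  have aux : ∀ (m : Nat) (a b : Int), (b + 1 - a).toNat = m →
      countPowerAux chars m a b (a + 1) (b + 1) = refSum chars a m := by
    intro m
    induction m with
    | zero => intro a b hm; rfl
    | succ m ih =>
        intro a b hm
        rw [countPowerAux, if_pos (⟨by omega, by omega⟩ : a ≤ b ∧ a + 1 ≤ b + 1)]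
        rw [ih (a + 1) b (by omega)]
        rfl
  intro a b hm
  rw [countPowerA, hm]
  exact aux m a b hm

lemma refSum_add (chars : List Char) :
    ∀ (p : Nat) (a : Int) (q : Nat),
      refSum chars a (p + q) = refSum chars a p + refSum chars (a + p) q := by
  intro p
  induction p with
  | zero => intro a q; simp [refSum]
  | succ p ih =>
      intro a q
      have : p + 1 + q = (p + q) + 1 := by omega
      rw [this]
      simp only [refSum, ih (a + 1) q]
      push_cast
      ring_nf

lemma prefList_get (chars : List Char) :
    ∀ (m : Nat) (a t0 : Int) (k : Nat), k < m →
      (prefList chars a t0 m)[k]? = some (t0 + refSum chars a (k + 1)) := by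
  intro m
  induction m with
  | zero => intro a t0 k hk; omega
  | succ m ih =>
      intro a t0 k hk
      cases k with
      | zero => simp [prefList, refSum]
      | succ k =>
          simp only [prefList, List.getElem?_cons_succ]
          rw [ih (a + 1) (t0 + mis chars a) k (by omega)]
          simp only [refSum]
          ring_nf

lemma buildP (chars : List Char) :
    ∀ (m : Nat) (a t0 : Int) (P0 : List Int),
      (PySem.List.pyRange a (a + m) 1).foldl
        (fun (s : Int × List Int) j =>
          let t := if PySem.List.pyGet? chars j ≠ PySem.List.pyGet? chars (j + 1) then s.1 + 1 else s.1
          (t, s.2 ++ [t])) (t0, P0)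
      = (t0 + refSum chars a m, P0 ++ prefList chars a t0 m) := by
  intro m
  induction m with
  | zero =>
      intro a t0 P0
      rw [show a + (0:Nat) = a by push_cast; ring, PySem.List.pyRange_one_eq_nil le_rfl]
      simp [refSum, prefList]
  | succ m ih =>
      intro a t0 P0
      rw [PySem.List.pyRange_one_cons (by push_cast; omega)]
      simp only [List.foldl_cons]
      have hstep : (if PySem.List.pyGet? chars a ≠ PySem.List.pyGet? chars (a + 1) then t0 + 1 else t0)
          = t0 + mis chars a := by
        unfold mis; split_ifs <;> ring
      simp only [hstep]
      rw [show a + ((m:Nat) + 1 : Nat) = (a + 1) + (m:Nat) by push_cast; ring]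
      rw [ih (a + 1) (t0 + mis chars a) (P0 ++ [t0 + mis chars a])]
      simp only [Prod.mk.injEq, refSum, prefList]
      refine ⟨by ring, by simp⟩

lemma Afold (chars : List Char) (K : Int) :
    ∀ (m : Nat) (i0 c : Int),
      (PySem.List.pyRange i0 (i0 + m) 1).foldl
        (fun (s : Int × Int × Int) i =>
          let temp := countPowerA chars s.1 s.2.1 i (i + K - 1)
          (i, i + K - 1, s.2.2 + temp)) (i0 - 1, i0 + K - 2, c)
      = (i0 + m - 1, i0 + m + K - 2, c + wsum chars K i0 m) := by
  intro m
  induction m with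
  | zero =>
      intro i0 c
      rw [show i0 + (0:Nat) = i0 by push_cast; ring, PySem.List.pyRange_one_eq_nil le_rfl]
      simp [wsum]
  | succ m ih =>
      intro i0 c
      rw [PySem.List.pyRange_one_cons (by push_cast; omega)]
      simp only [List.foldl_cons]
      have hcp : countPowerA chars (i0 - 1) (i0 + K - 2) i0 (i0 + K - 1)
          = refSum chars (i0 - 1) K.toNat := by
        have := cp_eq chars K.toNat (i0 - 1) (i0 + K - 2) (by omega)
        rw [show i0 - 1 + 1 = i0 by ring, show i0 + K - 2 + 1 = i0 + K - 1 by ring] at this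
        exact this
      simp only [hcp]
      rw [show i0 + ((m:Nat) + 1 : Nat) = (i0 + 1) + (m:Nat) by push_cast; ring]
      have H := ih (i0 + 1) (c + refSum chars (i0 - 1) K.toNat)
      rw [show (i0 + 1) - 1 = i0 by ring, show (i0 + 1) + K - 2 = i0 + K - 1 by ring] at H
      rw [H]
      simp only [Prod.mk.injEq, wsum]
      refine ⟨?_, ?_, ?_⟩ <;> push_cast <;> ring

lemma wsum_nonpos (chars : List Char) (K : Int) (hK : K ≤ 0) :
    ∀ (m : Nat) (i : Int), wsum chars K i m = 0 := by
  intro m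
  induction m with
  | zero => intro i; rfl
  | succ m ih =>
      intro i
      have h0 : K.toNat = 0 := by omega
      simp [wsum, h0, refSum, ih]

lemma pval (chars : List Char) (m : Nat) (j : Int) (h0 : 0 ≤ j) (h1 : j ≤ (m : Int)) :
    PySem.List.pyGet? ((0 : Int) :: prefList chars 0 0 m) j = some (refSum chars 0 j.toNat) := by
  rw [PySem.List.pyGet?_of_nonneg _ h0]
  cases hj : j.toNat with
  | zero => simp [refSum]
  | succ k =>
      have hk : k < m := by omega
      simp only [List.getElem?_cons_succ]
      rw [prefList_get chars m 0 0 k hk]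
      simp [refSum]

lemma window_eq (chars : List Char) (K i : Int) (hK : 1 ≤ K) (hi : 1 ≤ i) :
    refSum chars 0 (i + K - 1).toNat - refSum chars 0 (i - 1).toNat
      = refSum chars (i - 1) K.toNat := by
  have hsplit : (i + K - 1).toNat = (i - 1).toNat + K.toNat := by omega
  rw [hsplit, refSum_add chars (i - 1).toNat 0 K.toNat]
  rw [show (0 : Int) + ((i - 1).toNat : Int) = i - 1 by omega]
  ring

lemma Bfold (chars : List Char) (K : Int) (P : List Int) (hK : 1 ≤ K)
    (HP : ∀ j : Int, 0 ≤ j → j ≤ (chars.length : Int) - 1 →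
      PySem.List.pyGet? P j = some (refSum chars 0 j.toNat)) :
    ∀ (m : Nat) (i0 total : Int), 1 ≤ i0 → i0 + m ≤ (chars.length : Int) - K + 1 →
      (PySem.List.pyRange i0 (i0 + m) 1).foldl
        (fun total i =>
          total + ((PySem.List.pyGet? P (i + K - 1)).getD 0 - (PySem.List.pyGet? P (i - 1)).getD 0)) total
      = total + wsum chars K i0 m := by
  intro m
  induction m with
  | zero =>
      intro i0 total h1 h2
      rw [show i0 + (0:Nat) = i0 by push_cast; ring, PySem.List.pyRange_one_eq_nil le_rfl]
      simp [wsum]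
  | succ m ih =>
      intro i0 total h1 h2
      rw [PySem.List.pyRange_one_cons (by push_cast at h2 ⊢; omega)]
      simp only [List.foldl_cons]
      rw [HP (i0 + K - 1) (by omega) (by push_cast at h2; omega)]
      rw [HP (i0 - 1) (by omega) (by push_cast at h2; omega)]
      simp only [Option.getD_some]
      rw [window_eq chars K i0 hK h1]
      rw [show i0 + ((m:Nat) + 1 : Nat) = (i0 + 1) + (m:Nat) by push_cast; ring]
      rw [ih (i0 + 1) (total + refSum chars (i0 - 1) K.toNat) (by omega) (by push_cast at h2 ⊢; omega)]
      simp only [wsum]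
      ring

theorem Solution_spec : Claim_equal_Solution := by
  intro S N K _
  show Solution S N K = Solution_alt S N K
  unfold Solution Solution_alt
  dsimp only
  set chars := S.toList with hchars
  set n : Int := (chars.length : Int) with hn
  have hn0 : 0 ≤ n := by positivity
  by_cases hK : K ≤ 0
  · -- B returns 0; A's window counts are all 0
    rw [if_pos (Or.inl hK)]
    have hm : n - K + 1 = 1 + (((n - K).toNat : Nat) : Int) := by omega
    rw [hm, show ((0 : Int), K - 1, (0 : Int)) = ((1 : Int) - 1, 1 + K - 2, (0 : Int)) by
      simp only [Prod.mk.injEq]; exact ⟨by ring, by ring, trivial⟩]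
    rw [Afold chars K (n - K).toNat 1 0]
    simp [wsum_nonpos chars K hK]
  · by_cases hsmall : n - K < 1
    · -- fewer than one window: both sides 0
      rw [if_pos (Or.inr hsmall)]
      rw [PySem.List.pyRange_one_eq_nil (by omega)]
      rfl
    · -- main case: K ≥ 1 and at least one window
      rw [if_neg (by omega)]
      have hK1 : 1 ≤ K := by omega
      have hlen2 : 2 ≤ chars.length := by omega
      -- build the prefix list
      have hm' : n - 1 = 0 + ((chars.length - 1 : Nat) : Int) := by omega
      rw [hm', buildP chars (chars.length - 1) 0 0 [0]]
      simp only [List.singleton_append]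
      -- both folds equal the window sum
      have HP : ∀ j : Int, 0 ≤ j → j ≤ (chars.length : Int) - 1 →
          PySem.List.pyGet? ((0:Int) :: prefList chars 0 0 (chars.length - 1)) j
            = some (refSum chars 0 j.toNat) := by
        intro j hj0 hj1
        exact pval chars (chars.length - 1) j hj0 (by omega)
      have hm : n - K + 1 = 1 + (((n - K).toNat : Nat) : Int) := by omega
      rw [hm, show ((0 : Int), K - 1, (0 : Int)) = ((1 : Int) - 1, 1 + K - 2, (0 : Int)) by
        simp only [Prod.mk.injEq]; exact ⟨by ring, by ring, trivial⟩]
      rw [Afold chars K (n - K).toNat 1 0]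
      rw [Bfold chars K ((0:Int) :: prefList chars 0 0 (chars.length - 1)) hK1 HP
        (n - K).toNat 1 0 le_rfl (by omega)]
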